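-- pv_equiv track=rewrite | github.com/CODe1995/Problem-Solving | acmicpc/3190 뱀/3190 뱀.py | drcControl
-- ===== SOURCE A (Python) =====
-- def drcControl(direc,turnd):#현재 방향과 바꾸는 방향
--     s = [[1,0],[0,1],[-1,0],[0,-1]]
--     for i,[a,b] in enumerate(s):
--         if [a,b]==direc:
--             if turnd=='L':
--                 if i==0:i=4
--                 return s[i-1]
--             else:
--                 if i==3:i=-1
--                 return s[i+1]
-- ===== SOURCE B (Python) =====
-- def drcControl(direc, turnd):
--     # closed-form 90-degree rotation of the direction vector; None for unknown directions (as A)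
--     if direc not in ([1, 0], [0, 1], [-1, 0], [0, -1]):
--         return None
--     x, y = direc
--     return [y, -x] if turnd == 'L' else [-y, x]
-- ===== Notes on version B (the rewrite author's own statement) =====
-- stated objective: simpler
-- what changed: Replaced the enumerated table scan and neighbour indexing with the closed-form 90-degree rotation [y,-x] / [-y,x] of the direction vector.
import Mathlib
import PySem

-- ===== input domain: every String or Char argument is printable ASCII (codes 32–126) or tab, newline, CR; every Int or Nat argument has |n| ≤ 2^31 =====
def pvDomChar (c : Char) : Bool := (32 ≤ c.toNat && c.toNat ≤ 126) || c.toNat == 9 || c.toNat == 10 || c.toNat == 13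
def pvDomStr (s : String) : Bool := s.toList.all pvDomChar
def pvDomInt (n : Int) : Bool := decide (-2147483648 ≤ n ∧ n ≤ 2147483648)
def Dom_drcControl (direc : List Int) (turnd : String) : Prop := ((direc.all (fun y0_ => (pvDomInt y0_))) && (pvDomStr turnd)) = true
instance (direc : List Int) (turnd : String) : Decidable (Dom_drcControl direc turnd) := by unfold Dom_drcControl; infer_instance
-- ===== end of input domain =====

-- B replaces A's table scan with the closed-form 90° rotation; return values only, no side effects.

-- ===== PORT A =====
-- loop 'for i,[a,b] in enumerate(s): if [a,b]==direc: return …' = first match over the enumerated table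
def drcControl (direc : List Int) (turnd : String) : Option (List Int) :=
  let s : List (List Int) := [[1, 0], [0, 1], [-1, 0], [0, -1]]
  (PySem.List.enumerate s).findSome? (fun p =>
    if p.2 = direc then
      if turnd = "L" then
        let i : Int := if p.1 = 0 then 4 else p.1
        PySem.List.pyGet? s (i - 1)
      else
        let i : Int := if p.1 = 3 then -1 else p.1
        PySem.List.pyGet? s (i + 1)
    else none)

-- ===== PORT B =====
def drcControl_alt (direc : List Int) (turnd : String) : Option (List Int) :=
  if direc ∈ [[1, 0], [0, 1], [-1, 0], [0, -1]] then
    match direc with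
    | [x, y] => some (if turnd = "L" then [y, -x] else [-y, x])
    | _ => none
  else none

-- ===== PRECONDITION & SPEC =====
def Spec_drcControl (direc : List Int) (turnd : String) (out : Option (List Int)) : Prop := out = drcControl_alt direc turnd
instance (direc : List Int) (turnd : String) (out : Option (List Int)) : Decidable (Spec_drcControl direc turnd out) := by unfold Spec_drcControl; infer_instance

-- ===== CLAIM (what is proved, stated in full; the proofs are below) =====
def Claim_equal_drcControl : Prop := ∀ (direc : List Int) (turnd : String), Dom_drcControl direc turnd → Spec_drcControl direc turnd (drcControl direc turnd)

-- ===== LEMMAS AND PROOFS =====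

-- ===== VERDICT (by name: the statement is the Claim_ definition above) =====
theorem drcControl_spec : Claim_equal_drcControl := by
  intro direc turnd _
  unfold Spec_drcControl drcControl drcControl_alt
  by_cases h1 : direc = [1, 0]
  · subst h1; by_cases hL : turnd = "L" <;>
      simp [PySem.List.enumerate, PySem.List.pyGet?, PySem.List.pyIdx?, hL]
  · by_cases h2 : direc = [0, 1]
    · subst h2; by_cases hL : turnd = "L" <;>
        simp [PySem.List.enumerate, PySem.List.pyGet?, PySem.List.pyIdx?, hL]
    · by_cases h3 : direc = [-1, 0]
      · subst h3; by_cases hL : turnd = "L" <;>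
          simp [PySem.List.enumerate, PySem.List.pyGet?, PySem.List.pyIdx?, hL]
      · by_cases h4 : direc = [0, -1]
        · subst h4; by_cases hL : turnd = "L" <;>
            simp [PySem.List.enumerate, PySem.List.pyGet?, PySem.List.pyIdx?, hL]
        · simp [PySem.List.enumerate, Ne.symm h1, Ne.symm h2, Ne.symm h3, Ne.symm h4,
            h1, h2, h3, h4]
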